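-- pv_equiv track=rewrite | github.com/rizmaprawira/market_update_automation | scripts/download/download_general_insurance.py | _candidate_counts
-- ===== SOURCE A (Python) =====
-- from typing import Any
--
-- def _candidate_counts(candidates: list[dict[str, Any]]) -> dict[str, int]:
--     return {
--         "candidate_count": len(candidates),
--         "rejected_syariah_count": sum(1 for candidate in candidates if candidate.get("is_syariah")),
--         "rejected_unrelated_count": sum(
--             1 for candidate in candidates if candidate.get("is_unrelated") and not candidate.get("is_syariah")
--         ),
--     }
-- ===== SOURCE B (Python) =====
-- from typing import Any
--
-- def _candidate_counts(candidates: list[dict[str, Any]]) -> dict[str, int]: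
--     counts = {"candidate_count": 0, "rejected_syariah_count": 0, "rejected_unrelated_count": 0}
--     for candidate in candidates:
--         counts["candidate_count"] += 1
--         if candidate.get("is_syariah"):
--             counts["rejected_syariah_count"] += 1
--         elif candidate.get("is_unrelated"):
--             counts["rejected_unrelated_count"] += 1
--     return counts
-- ===== Notes on version B (the rewrite author's own statement) =====
-- stated objective: alternative
-- what changed: Replaced the three separate scans (len + two generator sums) with a single explicit pass that increments all three counters in one loop, using if/elif instead of the 'and not' condition.
import Mathlib
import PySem

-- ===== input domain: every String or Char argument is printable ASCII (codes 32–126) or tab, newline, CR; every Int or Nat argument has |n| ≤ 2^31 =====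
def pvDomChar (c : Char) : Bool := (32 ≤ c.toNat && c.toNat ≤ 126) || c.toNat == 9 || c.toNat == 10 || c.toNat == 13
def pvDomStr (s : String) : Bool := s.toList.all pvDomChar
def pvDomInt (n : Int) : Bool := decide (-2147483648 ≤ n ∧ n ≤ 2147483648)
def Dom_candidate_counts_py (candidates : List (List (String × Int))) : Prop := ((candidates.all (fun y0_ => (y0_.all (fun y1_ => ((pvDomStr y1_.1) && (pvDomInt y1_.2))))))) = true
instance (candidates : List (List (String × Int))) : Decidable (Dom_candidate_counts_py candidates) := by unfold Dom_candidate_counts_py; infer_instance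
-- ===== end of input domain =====

-- B fuses A's three scans (len + two generator sums) into one pass over the list; same O(n) cost.

-- shared helper: Python 'candidate.get(k)' truthiness on an Int-valued dict
-- (first match = dict lookup under the type convention; missing key / value 0 are falsy)
def pyTruthyGet (d : List (String × Int)) (k : String) : Bool :=
  match d.find? (fun p => p.1 == k) with
  | some p => p.2 != 0
  | none => false

-- ===== PORT A =====
def candidate_counts_py (candidates : List (List (String × Int))) : List (String × Int) :=
  [("candidate_count", (candidates.length : Int)),
   ("rejected_syariah_count",
     candidates.foldl (fun s c => if pyTruthyGet c "is_syariah" then s + 1 else s) 0),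
   ("rejected_unrelated_count",
     candidates.foldl
       (fun s c => if pyTruthyGet c "is_unrelated" && !(pyTruthyGet c "is_syariah") then s + 1 else s) 0)]

-- ===== PORT B =====
def pvStep (st : Int × Int × Int) (c : List (String × Int)) : Int × Int × Int :=
  if pyTruthyGet c "is_syariah" then (st.1 + 1, st.2.1 + 1, st.2.2)
  else if pyTruthyGet c "is_unrelated" then (st.1 + 1, st.2.1, st.2.2 + 1)
  else (st.1 + 1, st.2.1, st.2.2)

def candidate_counts_py_alt (candidates : List (List (String × Int))) : List (String × Int) :=
  let st := candidates.foldl pvStep (0, 0, 0)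
  [("candidate_count", st.1),
   ("rejected_syariah_count", st.2.1),
   ("rejected_unrelated_count", st.2.2)]

-- ===== PRECONDITION & SPEC =====
def Spec_candidate_counts_py (candidates : List (List (String × Int))) (out : List (String × Int)) : Prop := out = candidate_counts_py_alt candidates
instance (candidates : List (List (String × Int))) (out : List (String × Int)) : Decidable (Spec_candidate_counts_py candidates out) := by unfold Spec_candidate_counts_py; infer_instance

-- ===== CLAIM (what is proved, stated in full; the proofs are below) =====
def Claim_equal_candidate_counts_py : Prop := ∀ (candidates : List (List (String × Int))), Dom_candidate_counts_py candidates → Spec_candidate_counts_py candidates (candidate_counts_py candidates)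

-- ===== LEMMAS AND PROOFS =====

theorem pvStep_foldl (cs : List (List (String × Int))) :
    ∀ a b c : Int, cs.foldl pvStep (a, b, c) =
      (a + cs.length,
       cs.foldl (fun s x => if pyTruthyGet x "is_syariah" then s + 1 else s) b,
       cs.foldl (fun s x => if pyTruthyGet x "is_unrelated" && !(pyTruthyGet x "is_syariah") then s + 1 else s) c) := by
  induction cs with
  | nil => intro a b c; simp
  | cons hd tl ih =>
    intro a b c
    simp only [List.foldl_cons, pvStep, List.length_cons]
    by_cases hs : pyTruthyGet hd "is_syariah"
    · simp [hs, ih]; push_cast; ring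
    · by_cases hu : pyTruthyGet hd "is_unrelated" <;>
        · simp [hs, hu, ih]; push_cast; ring

-- ===== VERDICT (by name: the statement is the Claim_ definition above) =====
theorem candidate_counts_py_spec : Claim_equal_candidate_counts_py := by
  intro cs _
  unfold Spec_candidate_counts_py candidate_counts_py candidate_counts_py_alt
  rw [pvStep_foldl cs 0 0 0]
  simp
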